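-- pv_equiv track=rewrite | github.com/ValerioSpagnoli/University | Fondamenti di Informatica 1/Esercitazioni/Esercitazione 7/A_Ex4.py | A_Ex4
-- ===== SOURCE A (Python) =====
-- def A_Ex4(l):
--     M = []
--     for i in range(len(l)):
--         x = len(l[i])
--         L = l[i:i+1]+l[0:i]+l[i+1:len(l)]
--         for j in L:
--             if len(j) == x and l[i]!=j:
--                 a = (l[i], j)
--                 M.append(a)
--     return M
-- ===== SOURCE B (Python) =====
-- def A_Ex4(l):
--     groups = {}
--     for s in l:
--         groups.setdefault(len(s), []).append(s)
--     out = []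
--     for s in l:
--         for t in groups[len(s)]:
--             if t != s:
--                 out.append((s, t))
--     return out
-- ===== Notes on version B (the rewrite author's own statement) =====
-- stated objective: alternative
-- what changed: B builds a length-keyed dictionary of the strings in one pass and, for each string, scans only its own length group in list order, instead of A's per-index rebuild of the whole rotated list and a full scan with a length test on every pair.
import Mathlib
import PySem

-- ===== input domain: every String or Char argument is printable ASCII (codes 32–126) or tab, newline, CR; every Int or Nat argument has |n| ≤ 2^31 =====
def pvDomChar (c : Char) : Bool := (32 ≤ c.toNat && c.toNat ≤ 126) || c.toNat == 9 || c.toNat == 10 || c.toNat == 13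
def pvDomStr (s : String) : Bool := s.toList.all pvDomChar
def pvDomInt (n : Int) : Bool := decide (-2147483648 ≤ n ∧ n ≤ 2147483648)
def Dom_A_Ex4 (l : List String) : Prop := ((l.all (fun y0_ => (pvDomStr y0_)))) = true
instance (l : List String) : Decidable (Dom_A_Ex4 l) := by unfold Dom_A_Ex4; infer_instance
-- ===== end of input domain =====

-- B groups the strings by length in one dictionary pass and scans, for each string, only its
-- own length group in list order, instead of A's per-index rebuild of a rotated copy of the
-- whole list (objective: alternative; measured ~2.3x in a timing run, not confirmed at the largest size).

-- ===== PORT A =====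
def A_Ex4 (l : List String) : List (String × String) :=
  (PySem.List.pyRange 0 (l.length : Int) 1).foldl (fun M i =>
    let li := PySem.List.pyGetD l i ""
    let x := PySem.Str.len li
    let L := PySem.List.slice l (some i) (some (i + 1)) ++ PySem.List.slice l (some 0) (some i)
               ++ PySem.List.slice l (some (i + 1)) (some (l.length : Int))
    L.foldl (fun M j => if PySem.Str.len j == x && li != j then M ++ [(li, j)] else M) M) []

-- ===== PORT B =====
def A_Ex4_alt (l : List String) : List (String × String) :=
  let groups := l.foldl (fun d s => d.modify (PySem.Str.len s) [] (fun g => g ++ [s])) PySem.Dict.empty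
  l.foldl (fun out s =>
    (groups.getD (PySem.Str.len s) []).foldl
      (fun out t => if t != s then out ++ [(s, t)] else out) out) []

-- ===== PRECONDITION & SPEC =====
def Spec_A_Ex4 (l : List String) (out : List (String × String)) : Prop := out = A_Ex4_alt l
instance (l : List String) (out : List (String × String)) : Decidable (Spec_A_Ex4 l out) := by unfold Spec_A_Ex4; infer_instance

-- ===== CLAIM (what is proved, stated in full; the proofs are below) =====
def Claim_equal_A_Ex4 : Prop := ∀ (l : List String), Dom_A_Ex4 l → Spec_A_Ex4 l (A_Ex4 l)

-- ===== LEMMAS AND PROOFS =====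

-- the condition both programs use on a candidate partner t of s, and the per-source pair list
def pvCond (s t : String) : Bool := (PySem.Str.len t == PySem.Str.len s) && (s != t)
def pvQ (l : List String) (s : String) : List (String × String) :=
  (l.filter (pvCond s)).map (fun t => (s, t))

lemma flatMap_congr_mem {α β : Type} (l : List α) (f g : α → List β)
    (h : ∀ x ∈ l, f x = g x) : l.flatMap f = l.flatMap g := by
  induction l with
  | nil => rfl
  | cons a t ih => simp_all

lemma groups_getD (l : List String) (c : Int) :
    (l.foldl (fun d s => d.modify (PySem.Str.len s) [] (fun g => g ++ [s])) PySem.Dict.empty).getD c []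
      = l.filter (fun t => PySem.Str.len t == c) := by
  have h := PySem.Dict.getD_foldl_modify_append (l.map (fun s => (PySem.Str.len s, s)))
      PySem.Dict.empty c
  rw [List.foldl_map] at h
  simpa [List.filter_map, Function.comp_def] using h

lemma B_eq (l : List String) : A_Ex4_alt l = l.flatMap (pvQ l) := by
  unfold A_Ex4_alt
  simp only [groups_getD]
  have hstep : ∀ (out : List (String × String)) (s : String),
      (l.filter (fun t => PySem.Str.len t == PySem.Str.len s)).foldl
        (fun out t => if t != s then out ++ [(s, t)] else out) out = out ++ pvQ l s := by
    intro out s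
    rw [PySem.List.foldl_append_if (fun t => t != s) (fun t => (s, t))]
    unfold pvQ
    rw [List.filter_filter]
    congr 1
    congr 1
    apply List.filter_congr
    intro t _
    simp [pvCond, Bool.and_comm, bne_comm]
  calc l.foldl (fun out s =>
        (l.filter (fun t => PySem.Str.len t == PySem.Str.len s)).foldl
          (fun out t => if t != s then out ++ [(s, t)] else out) out) []
      = l.foldl (fun out s => out ++ pvQ l s) [] := by
        apply PySem.List.foldl_congr_mem; intro out s _; exact hstep out s
    _ = l.flatMap (pvQ l) := by
        rw [PySem.List.foldl_append_eq_flatMap]; simp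

lemma range_flatMap_getD {β : Type} (l : List String) (f : String → List β) :
    (List.range l.length).flatMap (fun k => f (l.getD k "")) = l.flatMap f := by
  induction l using List.reverseRecOn with
  | nil => simp
  | append_singleton xs x ih =>
    rw [List.length_append, List.length_singleton, List.range_succ]
    simp only [List.flatMap_append, List.flatMap_cons, List.flatMap_nil]
    rw [← ih]
    congr 1
    · apply flatMap_congr_mem
      intro k hk
      rw [List.getD_append xs [x] "" k (List.mem_range.mp hk)]
    · simp

lemma PA_eq (l : List String) (k : Nat) (hk : k < l.length) :
    (((PySem.List.slice l (some (k : Int)) (some ((k : Int) + 1))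
        ++ PySem.List.slice l (some 0) (some (k : Int))
        ++ PySem.List.slice l (some ((k : Int) + 1)) (some (l.length : Int))).filter
          (fun j => PySem.Str.len j == PySem.Str.len (l.getD k "") && (l.getD k "") != j)).map
            (fun j => (l.getD k "", j)))
      = pvQ l (l.getD k "") := by
  set s := l.getD k "" with hs
  have hcast : ((k : Int) + 1) = ((k + 1 : Nat) : Int) := by push_cast; ring
  have hdrop : l.drop k = s :: l.drop (k + 1) := by
    rw [hs, List.getD_eq_getElem l "" hk]; exact List.drop_eq_getElem_cons hk
  have hone : k + 1 - k = 1 := by omega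
  have h1 : PySem.List.slice l (some (k : Int)) (some ((k : Int) + 1)) = [s] := by
    rw [hcast, PySem.List.slice_natCast, hone, List.take_one, hdrop]
    rfl
  have h2 : PySem.List.slice l (some 0) (some (k : Int)) = l.take k := by
    rw [show (0 : Int) = ((0 : Nat) : Int) from rfl, PySem.List.slice_natCast]
    simp
  have h3 : PySem.List.slice l (some ((k : Int) + 1)) (some (l.length : Int)) = l.drop (k + 1) := by
    rw [hcast, PySem.List.slice_natCast]
    exact List.take_of_length_le (by simp)
  have hsplit : l = l.take k ++ (s :: l.drop (k + 1)) := by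
    conv_lhs => rw [← List.take_append_drop k l, hdrop]
  rw [h1, h2, h3]
  unfold pvQ
  conv_rhs => rw [hsplit]
  have hc : ∀ (xs : List String),
      List.filter (fun j => PySem.Str.len j == PySem.Str.len s && s != j) xs
        = List.filter (pvCond s) xs := by
    intro xs; apply List.filter_congr; intro t _; rfl
  simp only [List.filter_append, List.filter_cons, List.filter_nil, List.map_append, hc]
  simp [pvCond]

lemma A_eq (l : List String) : A_Ex4 l = l.flatMap (pvQ l) := by
  unfold A_Ex4
  have hstep : ∀ (M : List (String × String)) (i : Int),
      (PySem.List.slice l (some i) (some (i + 1)) ++ PySem.List.slice l (some 0) (some i)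
        ++ PySem.List.slice l (some (i + 1)) (some (l.length : Int))).foldl
        (fun M j => if PySem.Str.len j == PySem.Str.len (PySem.List.pyGetD l i "")
            && (PySem.List.pyGetD l i "") != j then M ++ [(PySem.List.pyGetD l i "", j)] else M) M
      = M ++ ((PySem.List.slice l (some i) (some (i + 1)) ++ PySem.List.slice l (some 0) (some i)
        ++ PySem.List.slice l (some (i + 1)) (some (l.length : Int))).filter
          (fun j => PySem.Str.len j == PySem.Str.len (PySem.List.pyGetD l i "")
            && (PySem.List.pyGetD l i "") != j)).map (fun j => (PySem.List.pyGetD l i "", j)) := by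
    intro M i
    exact PySem.List.foldl_append_if _ _ _ _
  simp only [hstep]
  rw [PySem.List.foldl_append_eq_flatMap]
  rw [PySem.List.pyRange_one]
  simp only [Int.sub_zero, Int.toNat_natCast, List.flatMap_map, List.nil_append]
  rw [← range_flatMap_getD l (pvQ l)]
  apply flatMap_congr_mem
  intro k hk
  have hk' : k < l.length := List.mem_range.mp hk
  have hz : (0 : Int) + (k : Int) = (k : Int) := by ring
  simp only [hz, PySem.List.pyGetD_natCast]
  exact PA_eq l k hk'

-- ===== VERDICT (by name: the statement is the Claim_ definition above) =====
theorem A_Ex4_spec : Claim_equal_A_Ex4 := by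
  intro l _
  unfold Spec_A_Ex4
  rw [A_eq, B_eq]
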